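-- pv_equiv track=rewrite | github.com/james5635/GeekForGeek-Data-Structure-and-Algorithm | array/longest_common_span_two_binary_arrays/longest_common_span_two_binary_arrays.py | longest_common_span_naive
-- ===== SOURCE A (Python) =====
-- def longest_common_span_naive(arr1, arr2):
--     """
--     Naive approach: Try all subarrays in both arrays.
--
--     Time Complexity: O(n³)
--     Space Complexity: O(1)
--
--     Algorithm:
--     - For each possible subarray in arr1
--     - Check if same subarray in arr2 has same sum
--     - Track maximum length
--
--     Args:
--         arr1: First binary array
--         arr2: Second binary array
--
--     Returns:
--         Maximum length of common span with same sum
--     """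
--     n = len(arr1)
--     max_len = 0
--
--     for i in range(n):
--         for j in range(i, n):
--             sum1 = sum(arr1[i : j + 1])
--             sum2 = sum(arr2[i : j + 1])
--
--             if sum1 == sum2:
--                 max_len = max(max_len, j - i + 1)
--
--     return max_len
-- ===== SOURCE B (Python) =====
-- def longest_common_span_naive(arr1, arr2):
--     """Linear-time re-implementation: longest zero-sum span of the element-wise
--     difference (arr2 read as 0 past its end, matching empty-slice sums), found
--     with a first-occurrence hashmap of prefix sums."""
--     first = {0: 0}
--     prefix = 0
--     max_len = 0
--     for i in range(len(arr1)):
--         prefix += arr1[i] - (arr2[i] if i < len(arr2) else 0)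
--         j = i + 1
--         if prefix in first:
--             max_len = max(max_len, j - first[prefix])
--         else:
--             first[prefix] = j
--     return max_len
-- ===== Notes on version B (the rewrite author's own statement) =====
-- stated objective: faster
-- what changed: Replaced the O(n^3) all-subarray double loop with per-subarray summation by a single O(n) pass over the element-wise difference, using a first-occurrence hashmap of prefix sums to find the longest zero-sum span.
import Mathlib
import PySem

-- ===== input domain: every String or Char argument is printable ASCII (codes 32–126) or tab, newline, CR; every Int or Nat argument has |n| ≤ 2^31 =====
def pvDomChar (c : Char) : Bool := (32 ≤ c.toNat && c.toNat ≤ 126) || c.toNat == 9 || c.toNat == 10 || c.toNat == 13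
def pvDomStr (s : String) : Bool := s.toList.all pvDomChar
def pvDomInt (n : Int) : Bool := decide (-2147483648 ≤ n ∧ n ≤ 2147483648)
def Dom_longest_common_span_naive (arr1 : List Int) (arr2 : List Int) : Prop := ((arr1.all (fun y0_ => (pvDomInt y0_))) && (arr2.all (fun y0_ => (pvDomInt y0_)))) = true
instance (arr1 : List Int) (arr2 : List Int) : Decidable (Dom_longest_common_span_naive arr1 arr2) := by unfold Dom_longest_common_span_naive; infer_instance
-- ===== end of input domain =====

-- B replaces A's O(n^3) all-subarray double loop with a single pass over the element-wise
-- difference, using a first-occurrence hashmap of prefix sums (longest zero-sum span).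


-- ===== PORT A =====
def longest_common_span_naive (arr1 : List Int) (arr2 : List Int) : Int :=
  let n : Int := PySem.List.len arr1
  (PySem.List.pyRange 0 n 1).foldl (fun max_len i =>
    (PySem.List.pyRange i n 1).foldl (fun max_len j =>
      let sum1 := (PySem.List.slice arr1 (some i) (some (j + 1))).sum
      let sum2 := (PySem.List.slice arr2 (some i) (some (j + 1))).sum
      if sum1 = sum2 then max max_len (j - i + 1) else max_len) max_len) 0

-- ===== PORT B =====
-- pyGetD arr1 i 0 renders arr1[i] (i always in range here); state = (first, prefix, max_len)
def longest_common_span_naive_alt (arr1 : List Int) (arr2 : List Int) : Int :=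
  let s := (PySem.List.pyRange 0 (PySem.List.len arr1) 1).foldl
    (fun (s : PySem.Dict Int Int × Int × Int) i =>
      let first := s.1
      let prefix_ := s.2.1 + (PySem.List.pyGetD arr1 i 0 -
        (if i < PySem.List.len arr2 then PySem.List.pyGetD arr2 i 0 else 0))
      let j := i + 1
      match first.get? prefix_ with
      | some t => (first, prefix_, max s.2.2 (j - t))
      | none => (first.insert prefix_ j, prefix_, s.2.2))
    (PySem.Dict.ofList [((0 : Int), (0 : Int))], 0, 0)
  s.2.2

-- ===== PRECONDITION & SPEC =====
def Spec_longest_common_span_naive (arr1 : List Int) (arr2 : List Int) (out : Int) : Prop := out = longest_common_span_naive_alt arr1 arr2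
instance (arr1 : List Int) (arr2 : List Int) (out : Int) : Decidable (Spec_longest_common_span_naive arr1 arr2 out) := by unfold Spec_longest_common_span_naive; infer_instance

-- ===== CLAIM (what is proved, stated in full; the proofs are below) =====
def Claim_equal_longest_common_span_naive : Prop := ∀ (arr1 : List Int) (arr2 : List Int), Dom_longest_common_span_naive arr1 arr2 → Spec_longest_common_span_naive arr1 arr2 (longest_common_span_naive arr1 arr2)

-- ===== LEMMAS AND PROOFS =====

-- prefix-sum difference P m = sum(arr1[:m]) - sum(arr2[:m])
def pvP (arr1 arr2 : List Int) (m : ℕ) : Int := (arr1.take m).sum - (arr2.take m).sum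

-- candidate value of the pair (a, b): b - a if the prefix differences agree, else 0
def pvG (P : ℕ → Int) (a b : ℕ) : ℕ := if P a = P b then b - a else 0

-- best span ending at b, and the running answer after prefix index m
def pvH (P : ℕ → Int) (b : ℕ) : ℕ := (Finset.range b).sup (fun a => pvG P a b)
def pvML (P : ℕ → Int) (m : ℕ) : ℕ := (Finset.range (m + 1)).sup (pvH P)

-- B's loop body with the loop variable as a natural number
def pvStep (arr1 arr2 : List Int) (s : PySem.Dict Int Int × Int × Int) (k : ℕ) :
    PySem.Dict Int Int × Int × Int :=
  let first := s.1
  let prefix_ := s.2.1 + (PySem.List.pyGetD arr1 (k : Int) 0 -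
    (if (k : Int) < PySem.List.len arr2 then PySem.List.pyGetD arr2 (k : Int) 0 else 0))
  let j := (k : Int) + 1
  match first.get? prefix_ with
  | some t => (first, prefix_, max s.2.2 (j - t))
  | none => (first.insert prefix_ j, prefix_, s.2.2)

lemma sum_take_succ (xs : List Int) (m : ℕ) :
    (xs.take (m + 1)).sum = (xs.take m).sum + xs.getD m 0 := by
  rw [List.take_add_one, List.sum_append]
  cases h : xs[m]? <;> simp [List.getD_eq_getElem?_getD, h]

lemma sum_slice_take (xs : List Int) (i b : ℕ) (h : i ≤ b) :
    (PySem.List.slice xs (some (i : Int)) (some (b : Int))).sum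
      = (xs.take b).sum - (xs.take i).sum := by
  obtain ⟨k, rfl⟩ : ∃ k, b = i + k := ⟨b - i, by omega⟩
  rw [PySem.List.slice_natCast, show i + k - i = k from by omega,
    List.take_add, List.sum_append]
  ring

lemma pvP_succ (arr1 arr2 : List Int) (m : ℕ) :
    pvP arr1 arr2 (m + 1) = pvP arr1 arr2 m + (arr1.getD m 0 - arr2.getD m 0) := by
  unfold pvP
  rw [sum_take_succ, sum_take_succ]
  ring

lemma cond_iff (arr1 arr2 : List Int) (i b : ℕ) (h : i ≤ b) :
    ((PySem.List.slice arr1 (some (i : Int)) (some (b : Int))).sum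
      = (PySem.List.slice arr2 (some (i : Int)) (some (b : Int))).sum)
      ↔ pvP arr1 arr2 i = pvP arr1 arr2 b := by
  rw [sum_slice_take _ _ _ h, sum_slice_take _ _ _ h]
  unfold pvP
  constructor <;> intro <;> omega

lemma foldl_cast {α : Type} (l : List α) (f : ℕ → α → ℕ) (F : Int → α → Int)
    (h : ∀ (c : ℕ) x, x ∈ l → F (c : Int) x = ((f c x : ℕ) : Int)) (c : ℕ) :
    l.foldl F (c : Int) = ((l.foldl f c : ℕ) : Int) := by
  induction l generalizing c with
  | nil => rfl
  | cons x t ih =>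
    simp only [List.foldl_cons]
    rw [h c x (by simp)]
    exact ih (fun c y hy => h c y (by simp [hy])) _

lemma foldl_max_sup (m : ℕ) (f : ℕ → ℕ) (c : ℕ) :
    (List.range m).foldl (fun acc k => max acc (f k)) c = max c ((Finset.range m).sup f) := by
  induction m with
  | zero => simp
  | succ m ih =>
    rw [List.range_succ, List.foldl_append, ih, Finset.range_add_one, Finset.sup_insert]
    simp only [List.foldl_cons, List.foldl_nil]
    have hsm : ∀ a b : ℕ, a ⊔ b = max a b := fun _ _ => rfl
    rw [hsm, max_assoc, max_comm ((Finset.range m).sup f) (f m)]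

lemma head?_min {l : List ℕ} (hl : l.Pairwise (· < ·)) {a : ℕ} (h : l.head? = some a) :
    ∀ x ∈ l, a ≤ x := by
  cases l with
  | nil => simp at h
  | cons y t =>
    simp only [List.head?_cons, Option.some.injEq] at h
    subst h
    intro x hx
    rcases List.mem_cons.mp hx with rfl | hx
    · exact le_refl _
    · exact le_of_lt ((List.pairwise_cons.mp hl).1 x hx)

lemma pyRange_zero_cast (n : ℕ) :
    PySem.List.pyRange 0 (n : Int) 1 = (List.range n).map (fun k => ((k : ℕ) : Int)) := by
  rw [PySem.List.pyRange_one]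
  norm_num

lemma pvML_succ (P : ℕ → Int) (m : ℕ) : pvML P (m + 1) = max (pvML P m) (pvH P (m + 1)) := by
  unfold pvML
  rw [Finset.range_add_one, Finset.sup_insert]
  have hsm : ∀ a b : ℕ, a ⊔ b = max a b := fun _ _ => rfl
  rw [hsm, max_comm]

lemma pyRange_cast (n i : ℕ) :
    PySem.List.pyRange (i : Int) ((n : ℕ) : Int) 1
      = (List.range (n - i)).map (fun (k : ℕ) => (i : Int) + (k : Int)) := by
  rw [PySem.List.pyRange_one, show (((n : ℕ) : Int) - (i : Int)).toNat = n - i from by omega]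

lemma A_inner (arr1 arr2 : List Int) (i : ℕ) (c : ℕ) :
    (PySem.List.pyRange (i : Int) ((arr1.length : ℕ) : Int) 1).foldl
      (fun max_len j =>
        if (PySem.List.slice arr1 (some (i : Int)) (some (j + 1))).sum
            = (PySem.List.slice arr2 (some (i : Int)) (some (j + 1))).sum
          then max max_len (j - (i : Int) + 1) else max_len) ((c : ℕ) : Int)
    = ((max c ((Finset.range (arr1.length - i)).sup
        (fun k => pvG (pvP arr1 arr2) i (i + k + 1))) : ℕ) : Int) := by
  rw [pyRange_cast arr1.length i, List.foldl_map]
  refine Eq.trans (foldl_cast _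
    (fun c' k => if pvP arr1 arr2 i = pvP arr1 arr2 (i + k + 1) then max c' (k + 1) else c')
    _ ?_ c) ?_
  · intro c' k _
    simp only []
    rw [show ((i : Int) + (k : Int) + 1) = (((i + k + 1 : ℕ) : ℕ) : Int) from by push_cast; ring]
    rw [if_congr (cond_iff arr1 arr2 i (i + k + 1) (by omega)) rfl rfl]
    split_ifs with hc
    · rw [show ((i : Int) + (k : Int) - (i : Int) + 1) = (((k + 1 : ℕ) : ℕ) : Int) from by
        push_cast; ring, Nat.cast_max]
    · rfl
  · have hfun : (fun (c' : ℕ) (k : ℕ) =>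
        if pvP arr1 arr2 i = pvP arr1 arr2 (i + k + 1) then max c' (k + 1) else c')
        = (fun c' k => max c' (if pvP arr1 arr2 i = pvP arr1 arr2 (i + k + 1) then k + 1 else 0)) := by
      funext c' k
      split_ifs <;> simp
    rw [hfun, foldl_max_sup]
    have hsup : (Finset.range (arr1.length - i)).sup
          (fun k => if pvP arr1 arr2 i = pvP arr1 arr2 (i + k + 1) then k + 1 else 0)
        = (Finset.range (arr1.length - i)).sup (fun k => pvG (pvP arr1 arr2) i (i + k + 1)) := by
      refine Finset.sup_congr rfl fun k _ => ?_
      unfold pvG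
      rw [show i + k + 1 - i = k + 1 from by omega]
    rw [hsup]

lemma A_eq_sup (arr1 arr2 : List Int) :
    longest_common_span_naive arr1 arr2
      = (((Finset.range arr1.length).sup (fun i =>
          (Finset.range (arr1.length - i)).sup (fun k =>
            pvG (pvP arr1 arr2) i (i + k + 1))) : ℕ) : Int) := by
  simp only [longest_common_span_naive, PySem.List.len_eq]
  rw [pyRange_zero_cast arr1.length, List.foldl_map]
  refine Eq.trans (foldl_cast _
    (fun c i => max c ((Finset.range (arr1.length - i)).sup
      (fun k => pvG (pvP arr1 arr2) i (i + k + 1)))) _ ?_ 0) ?_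
  · intro c i _
    exact A_inner arr1 arr2 i c
  · rw [foldl_max_sup]
    simp

lemma port_B_eq_fold (arr1 arr2 : List Int) :
    longest_common_span_naive_alt arr1 arr2
      = ((List.range arr1.length).foldl (pvStep arr1 arr2)
          (PySem.Dict.ofList [((0 : Int), (0 : Int))], 0, 0)).2.2 := by
  simp only [longest_common_span_naive_alt, PySem.List.len_eq]
  rw [pyRange_zero_cast arr1.length, List.foldl_map]
  rfl

lemma pvStep_eq (arr1 arr2 : List Int) (D : PySem.Dict Int Int) (p ml : Int) (k : ℕ) :
    pvStep arr1 arr2 (D, p, ml) k =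
      match D.get? (p + (arr1.getD k 0 - arr2.getD k 0)) with
      | some t => (D, p + (arr1.getD k 0 - arr2.getD k 0), max ml ((k : Int) + 1 - t))
      | none => (D.insert (p + (arr1.getD k 0 - arr2.getD k 0)) ((k : Int) + 1),
                 p + (arr1.getD k 0 - arr2.getD k 0), ml) := by
  unfold pvStep
  simp only [PySem.List.pyGetD_natCast, PySem.List.len_eq]
  by_cases h : k < arr2.length
  · rw [if_pos (show ((k : ℕ) : Int) < ((arr2.length : ℕ) : Int) from by exact_mod_cast h)]
  · rw [if_neg (show ¬ (((k : ℕ) : Int) < ((arr2.length : ℕ) : Int)) from by omega)]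
    rw [List.getD_eq_default arr2 0 (by omega), sub_zero]

lemma B_inv (arr1 arr2 : List Int) (m : ℕ) :
    ∃ D : PySem.Dict Int Int,
      (List.range m).foldl (pvStep arr1 arr2) (PySem.Dict.ofList [((0 : Int), (0 : Int))], 0, 0)
        = (D, pvP arr1 arr2 m, ((pvML (pvP arr1 arr2) m : ℕ) : Int))
      ∧ ∀ v : Int, D.get? v
          = (((List.range (m + 1)).filter (fun t => decide (pvP arr1 arr2 t = v))).head?).map
              (fun t => ((t : ℕ) : Int)) := by
  induction m with
  | zero =>
    refine ⟨PySem.Dict.ofList [((0 : Int), (0 : Int))], ?_, ?_⟩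
    · have h1 : pvP arr1 arr2 0 = 0 := by simp [pvP]
      have h2 : pvML (pvP arr1 arr2) 0 = 0 := by simp [pvML, pvH]
      simp [h1, h2]
    · intro v
      rw [show PySem.Dict.ofList [((0 : Int), (0 : Int))] = PySem.Dict.empty.insert 0 0 from rfl,
        PySem.Dict.get?_insert]
      by_cases hv : v = 0
      · subst hv
        simp [List.range_one, pvP]
      · rw [if_neg hv]
        have hne : ¬ (pvP arr1 arr2 0 = v) := by
          simp only [pvP, List.take_zero, List.sum_nil, sub_zero]
          exact fun h => hv h.symm
        simp [PySem.Dict.get?_empty, List.range_one, hne]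
  | succ m ih =>
    obtain ⟨D, hfold, hD⟩ := ih
    have hfold' : (List.range (m + 1)).foldl (pvStep arr1 arr2)
        (PySem.Dict.ofList [((0 : Int), (0 : Int))], 0, 0)
        = pvStep arr1 arr2 (D, pvP arr1 arr2 m, ((pvML (pvP arr1 arr2) m : ℕ) : Int)) m := by
      rw [List.range_succ, List.foldl_append, hfold]
      rfl
    rw [hfold', pvStep_eq]
    simp only [← pvP_succ]
    rw [hD]
    cases hh : (((List.range (m + 1)).filter
        (fun t => decide (pvP arr1 arr2 t = pvP arr1 arr2 (m + 1)))).head?) with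
    | some t0 =>
      simp only [Option.map_some]
      have ht0mem : t0 ∈ (List.range (m + 1)).filter
          (fun t => decide (pvP arr1 arr2 t = pvP arr1 arr2 (m + 1))) :=
        List.mem_of_mem_head? hh
      have ht0lt : t0 < m + 1 := List.mem_range.mp (List.mem_of_mem_filter ht0mem)
      have ht0P : pvP arr1 arr2 t0 = pvP arr1 arr2 (m + 1) := by
        have := List.of_mem_filter ht0mem
        simpa using this
      have ht0min : ∀ a ∈ (List.range (m + 1)).filter
          (fun t => decide (pvP arr1 arr2 t = pvP arr1 arr2 (m + 1))), t0 ≤ a :=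
        head?_min (List.pairwise_lt_range.sublist List.filter_sublist) hh
      have hH : pvH (pvP arr1 arr2) (m + 1) = (m + 1) - t0 := by
        apply le_antisymm
        · apply Finset.sup_le
          intro a ha
          unfold pvG
          split_ifs with hPa
          · have : t0 ≤ a := ht0min a (List.mem_filter.mpr
              ⟨List.mem_range.mpr (Finset.mem_range.mp ha), by simp [hPa]⟩)
            omega
          · omega
        · have hg : pvG (pvP arr1 arr2) t0 (m + 1) = (m + 1) - t0 := by
            unfold pvG
            rw [if_pos ht0P]
          calc (m + 1) - t0 = pvG (pvP arr1 arr2) t0 (m + 1) := hg.symm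
            _ ≤ _ := Finset.le_sup (f := fun a => pvG (pvP arr1 arr2) a (m + 1))
              (Finset.mem_range.mpr (by omega))
      refine ⟨D, ?_, ?_⟩
      · have hmax : max (((pvML (pvP arr1 arr2) m : ℕ)) : Int) ((m : Int) + 1 - ((t0 : ℕ) : Int))
            = ((pvML (pvP arr1 arr2) (m + 1) : ℕ) : Int) := by
          rw [pvML_succ, hH, Nat.cast_max]
          congr 1
          omega
        rw [hmax]
      · intro v
        rw [hD v, show List.range (m + 1 + 1) = List.range (m + 1) ++ [m + 1] from
          List.range_succ, List.filter_append, List.head?_append]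
        by_cases hv : pvP arr1 arr2 (m + 1) = v
        · have hpred : (fun t => decide (pvP arr1 arr2 t = v))
              = (fun t => decide (pvP arr1 arr2 t = pvP arr1 arr2 (m + 1))) := by
            funext t
            rw [hv]
          rw [hpred, hh]
          simp
        · have hsing : (List.filter (fun t => decide (pvP arr1 arr2 t = v)) [m + 1]) = [] := by
            simp [hv]
          rw [hsing]
          simp
    | none =>
      simp only [Option.map_none]
      have hfl : (List.range (m + 1)).filter
          (fun t => decide (pvP arr1 arr2 t = pvP arr1 arr2 (m + 1))) = [] :=
        List.head?_eq_none_iff.mp hh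
      have hH0 : pvH (pvP arr1 arr2) (m + 1) = 0 := by
        apply le_antisymm _ (Nat.zero_le _)
        apply Finset.sup_le
        intro a ha
        unfold pvG
        split_ifs with hPa
        · exfalso
          have : a ∈ (List.range (m + 1)).filter
              (fun t => decide (pvP arr1 arr2 t = pvP arr1 arr2 (m + 1))) :=
            List.mem_filter.mpr ⟨List.mem_range.mpr (Finset.mem_range.mp ha), by simp [hPa]⟩
          rw [hfl] at this
          simp at this
        · exact le_refl _
      refine ⟨D.insert (pvP arr1 arr2 (m + 1)) ((m : Int) + 1), ?_, ?_⟩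
      · have hml : pvML (pvP arr1 arr2) (m + 1) = pvML (pvP arr1 arr2) m := by
          rw [pvML_succ, hH0]
          simp
        rw [hml]
      · intro v
        rw [PySem.Dict.get?_insert, show List.range (m + 1 + 1)
          = List.range (m + 1) ++ [m + 1] from List.range_succ,
          List.filter_append, List.head?_append]
        by_cases hv : v = pvP arr1 arr2 (m + 1)
        · rw [if_pos hv]
          subst hv
          rw [hfl]
          simp
        · rw [if_neg hv, hD v]
          have hne : ¬ (pvP arr1 arr2 (m + 1) = v) := fun h => hv h.symm
          have hsing : (List.filter (fun t => decide (pvP arr1 arr2 t = v)) [m + 1]) = [] := by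
            simp [hne]
          rw [hsing]
          simp

lemma B_eq_ML (arr1 arr2 : List Int) :
    longest_common_span_naive_alt arr1 arr2
      = ((pvML (pvP arr1 arr2) arr1.length : ℕ) : Int) := by
  rw [port_B_eq_fold]
  obtain ⟨D, hfold, -⟩ := B_inv arr1 arr2 arr1.length
  rw [hfold]

lemma sup_bridge (P : ℕ → Int) (n : ℕ) :
    (Finset.range n).sup (fun i => (Finset.range (n - i)).sup (fun k => pvG P i (i + k + 1)))
      = pvML P n := by
  apply le_antisymm
  · apply Finset.sup_le
    intro i hi
    apply Finset.sup_le
    intro k hk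
    have hi' : i < n := Finset.mem_range.mp hi
    have hk' : k < n - i := Finset.mem_range.mp hk
    calc pvG P i (i + k + 1) ≤ pvH P (i + k + 1) := by
          unfold pvH
          exact Finset.le_sup (f := fun a => pvG P a (i + k + 1))
            (Finset.mem_range.mpr (by omega))
      _ ≤ pvML P n := by
          unfold pvML
          exact Finset.le_sup (f := pvH P) (Finset.mem_range.mpr (by omega))
  · unfold pvML
    apply Finset.sup_le
    intro b hb
    unfold pvH
    apply Finset.sup_le
    intro a ha
    have hb' : b < n + 1 := Finset.mem_range.mp hb
    have ha' : a < b := Finset.mem_range.mp ha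
    calc pvG P a b = pvG P a (a + (b - a - 1) + 1) := by
          rw [show a + (b - a - 1) + 1 = b from by omega]
      _ ≤ (Finset.range (n - a)).sup (fun k => pvG P a (a + k + 1)) :=
          Finset.le_sup (f := fun k => pvG P a (a + k + 1)) (Finset.mem_range.mpr (by omega))
      _ ≤ _ :=
          Finset.le_sup
            (f := fun i => (Finset.range (n - i)).sup (fun k => pvG P i (i + k + 1)))
            (Finset.mem_range.mpr (by omega))

-- ===== VERDICT (by name: the statement is the Claim_ definition above) =====
theorem longest_common_span_naive_spec : Claim_equal_longest_common_span_naive := by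
  intro arr1 arr2 _
  unfold Spec_longest_common_span_naive
  rw [A_eq_sup, B_eq_ML, sup_bridge]
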